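-- pv_equiv track=rewrite | github.com/selimsevim/agent-safety-monitor | src/ast_extractor.py | is_exfiltration_trace
-- ===== SOURCE A (Python) =====
-- def is_exfiltration_trace(trace: list[dict]) -> bool:
--     """
--     Relaxed version: any env read OR sensitive file read
--     combined with any outbound action.
--     """
--     has_read = any(
--         s['tool'] in ('read_env', 'read_file')
--         for s in trace
--     )
--     has_outbound = any(
--         s['tool'] in ('http_post', 'http_get', 'exec_shell',
--                       'send_email', 'tcp_connect')
--         for s in trace
--     )
--     return has_read and has_outbound
-- ===== SOURCE B (Python) =====
-- def is_exfiltration_trace(trace: list[dict]) -> bool: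
--     """Single fused pass: classify each step's tool once into read/outbound
--     flags and return True as soon as both categories have been seen."""
--     has_read = False
--     has_outbound = False
--     for s in trace:
--         t = s['tool']
--         if t in ('read_env', 'read_file'):
--             has_read = True
--         elif t in ('http_post', 'http_get', 'exec_shell',
--                    'send_email', 'tcp_connect'):
--             has_outbound = True
--         if has_read and has_outbound:
--             return True
--     return False
-- ===== Notes on version B (the rewrite author's own statement) =====
-- stated objective: alternative
-- what changed: A makes two separate any() passes over the trace; B is one fused loop that classifies each step's tool once into two accumulated flags and early-returns True the moment both a read and an outbound step have been seen.
-- outside the precondition, e.g. on is_exfiltration_trace([{'tool': 'read_env'}, {'tool': 'http_post'}, {}]): A returns True, B returns True; on is_exfiltration_trace([{}]): A raises KeyError, B raises KeyError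
import Mathlib
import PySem

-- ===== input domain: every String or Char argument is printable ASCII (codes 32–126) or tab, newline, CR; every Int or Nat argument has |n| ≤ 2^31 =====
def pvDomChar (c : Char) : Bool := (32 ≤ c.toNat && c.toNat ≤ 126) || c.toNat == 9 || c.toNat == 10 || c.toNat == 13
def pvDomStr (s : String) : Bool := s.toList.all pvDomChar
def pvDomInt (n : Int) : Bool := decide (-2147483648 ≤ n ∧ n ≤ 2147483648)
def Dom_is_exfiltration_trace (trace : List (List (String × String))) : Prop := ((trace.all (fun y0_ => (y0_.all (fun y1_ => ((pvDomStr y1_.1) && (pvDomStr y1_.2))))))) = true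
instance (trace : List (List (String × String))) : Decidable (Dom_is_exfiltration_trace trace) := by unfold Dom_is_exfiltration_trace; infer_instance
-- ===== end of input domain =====

-- B fuses A's two any() passes into one loop with two accumulated flags and an early return (alternative decomposition, same cost).

-- ===== PORT A =====
-- s['tool'] ported as getD with default "": Pre_ guarantees the key is present, and "" matches no tool name.
def is_exfiltration_trace (trace : List (List (String × String))) : Bool :=
  let has_read := trace.any (fun s =>
    ["read_env", "read_file"].contains (PySem.Dict.getD (PySem.Dict.mk s) "tool" ""))
  let has_outbound := trace.any (fun s =>
    ["http_post", "http_get", "exec_shell", "send_email", "tcp_connect"].contains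
      (PySem.Dict.getD (PySem.Dict.mk s) "tool" ""))
  has_read && has_outbound

-- ===== PORT B =====
def pvReadTools : List String := ["read_env", "read_file"]
def pvOutboundTools : List String := ["http_post", "http_get", "exec_shell", "send_email", "tcp_connect"]

-- the fused loop of Source B: per step classify t once (if/elif), early-return once both flags hold
def pvExfilLoop : List (List (String × String)) → Bool → Bool → Bool
  | [], _, _ => false
  | s :: rest, has_read, has_outbound =>
    let t := PySem.Dict.getD (PySem.Dict.mk s) "tool" ""
    let has_read := if pvReadTools.contains t then true else has_read
    let has_outbound :=
      if pvReadTools.contains t then has_outbound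
      else if pvOutboundTools.contains t then true else has_outbound
    if has_read && has_outbound then true else pvExfilLoop rest has_read has_outbound

def is_exfiltration_trace_alt (trace : List (List (String × String))) : Bool :=
  pvExfilLoop trace false false

-- ===== PRECONDITION & SPEC =====
-- Pre_ excludes any trace with a step lacking the 'tool' key: Python A raises KeyError there
-- unless a read and an outbound tool both precede the malformed step, and that residual return
-- is an artefact of any()'s short-circuit order; B behaves identically but the corner is excluded.
def Pre_is_exfiltration_trace (trace : List (List (String × String))) : Prop :=
  ∀ s ∈ trace, ((PySem.Dict.mk s).contains "tool") = true
instance (trace : List (List (String × String))) : Decidable (Pre_is_exfiltration_trace trace) := by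
  unfold Pre_is_exfiltration_trace; infer_instance

def pvWitness_is_exfiltration_trace : (List (List (String × String))) :=
  [[("tool", "read_env")], [("tool", "http_post")]]

def Spec_is_exfiltration_trace (trace : List (List (String × String))) (out : Bool) : Prop := out = is_exfiltration_trace_alt trace
instance (trace : List (List (String × String))) (out : Bool) : Decidable (Spec_is_exfiltration_trace trace out) := by unfold Spec_is_exfiltration_trace; infer_instance

-- ===== CLAIM (what is proved, stated in full; the proofs are below) =====
def Claim_equal_is_exfiltration_trace : Prop := ∀ (trace : List (List (String × String))), Dom_is_exfiltration_trace trace → Pre_is_exfiltration_trace trace → Spec_is_exfiltration_trace trace (is_exfiltration_trace trace)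

-- ===== LEMMAS AND PROOFS =====
-- the two tool categories are disjoint
lemma read_not_outbound (t : String) (h : t ∈ pvReadTools) :
    t ∉ pvOutboundTools := by
  simp only [pvReadTools, List.mem_cons, List.not_mem_nil, or_false] at h
  rcases h with rfl | rfl <;> decide

-- loop invariant: as long as the early-return has not fired, the loop computes
-- (has_read OR a read ahead) AND (has_outbound OR an outbound ahead)
lemma pvExfilLoop_eq (l : List (List (String × String))) (r o : Bool) (h : (r && o) = false) :
    pvExfilLoop l r o =
      ((r || l.any (fun s => pvReadTools.contains (PySem.Dict.getD (PySem.Dict.mk s) "tool" ""))) &&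
       (o || l.any (fun s => pvOutboundTools.contains (PySem.Dict.getD (PySem.Dict.mk s) "tool" "")))) := by
  induction l generalizing r o with
  | nil => simp [pvExfilLoop, h]
  | cons s rest ih =>
    simp only [pvExfilLoop, List.any_cons]
    set t := PySem.Dict.getD (PySem.Dict.mk s) "tool" "" with ht
    by_cases hr : t ∈ pvReadTools
    · have ho := read_not_outbound t hr
      cases o with
      | true => simp [hr, ho]
      | false => simpa [hr, ho] using ih true false (by decide)
    · by_cases hob : t ∈ pvOutboundTools
      · cases r with
        | true => simp [hr, hob]
        | false => simpa [hr, hob] using ih false true (by decide)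
      · simpa [hr, hob, h] using ih r o h

-- ===== VERDICT (by name: the statement is the Claim_ definition above) =====
theorem is_exfiltration_trace_spec : Claim_equal_is_exfiltration_trace := by
  intro trace _ _
  unfold Spec_is_exfiltration_trace is_exfiltration_trace is_exfiltration_trace_alt
  rw [pvExfilLoop_eq trace false false (by decide)]
  simp [pvReadTools, pvOutboundTools]
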